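-- pv_equiv track=rewrite | github.com/gsrr/leetcode | leetcode/844. Backspace String Compare.py | parse
-- ===== SOURCE A (Python) =====
-- def parse(s):
--     st = []
--     for c in s:
--         if c == "#":
--             if len(st) != 0:
--                 st.pop()
--         else:
--             st.append(c)
--     return "".join(st)
-- ===== SOURCE B (Python) =====
-- def parse(s):
--     skip = 0
--     out = []
--     for c in reversed(s):
--         if c == "#":
--             skip += 1
--         elif skip > 0:
--             skip -= 1
--         else:
--             out.append(c)
--     return "".join(reversed(out))
-- ===== Notes on version B (the rewrite author's own statement) =====
-- stated objective: idiomatic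
-- what changed: Replaces the character stack with a right-to-left scan keeping only an integer skip counter; deleted characters are never stored, and the surviving characters are collected and reversed at the end.
import Mathlib
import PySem

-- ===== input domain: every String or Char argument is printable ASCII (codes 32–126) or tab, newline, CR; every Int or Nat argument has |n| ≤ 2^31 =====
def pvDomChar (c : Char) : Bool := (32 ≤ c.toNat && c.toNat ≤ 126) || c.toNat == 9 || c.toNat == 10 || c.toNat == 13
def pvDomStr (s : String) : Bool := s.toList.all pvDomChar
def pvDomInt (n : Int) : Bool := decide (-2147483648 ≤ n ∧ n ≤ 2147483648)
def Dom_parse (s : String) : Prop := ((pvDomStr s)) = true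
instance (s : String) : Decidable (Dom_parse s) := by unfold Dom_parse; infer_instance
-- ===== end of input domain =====

-- B replaces A's character stack by a right-to-left scan with an integer skip counter (idiomatic alternative, same O(n) cost).

-- ===== PORT A =====
-- one step of A's loop: '#' pops the stack (if nonempty), any other char is pushed
def parseStep (st : List Char) (c : Char) : List Char :=
  if c = '#' then (if st ≠ [] then st.dropLast else st) else st ++ [c]

def parse (s : String) : String :=
  String.mk (s.toList.foldl parseStep [])

-- ===== PORT B =====
-- Source B's loop over reversed(s): skip counts pending backspaces, out collects survivors in scan order
def parseAltLoop : List Char → Nat → List Char → List Char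
  | [], _, out => out
  | c :: rest, skip, out =>
    if c = '#' then parseAltLoop rest (skip + 1) out
    else if skip > 0 then parseAltLoop rest (skip - 1) out
    else parseAltLoop rest skip (out ++ [c])

def parse_alt (s : String) : String :=
  String.mk (parseAltLoop s.toList.reverse 0 []).reverse

-- ===== PRECONDITION & SPEC =====
def Spec_parse (s : String) (out : String) : Prop := out = parse_alt s
instance (s : String) (out : String) : Decidable (Spec_parse s out) := by unfold Spec_parse; infer_instance

-- ===== CLAIM (what is proved, stated in full; the proofs are below) =====
def Claim_equal_parse : Prop := ∀ (s : String), Dom_parse s → Spec_parse s (parse s)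

-- ===== LEMMAS AND PROOFS =====

-- out is a pure accumulator: it can be factored out of the loop
theorem parseAltLoop_out (m : List Char) : ∀ (k : Nat) (out : List Char),
    parseAltLoop m k out = out ++ parseAltLoop m k [] := by
  induction m with
  | nil => intro k out; simp [parseAltLoop]
  | cons c rest ih =>
    intro k out
    simp only [parseAltLoop]
    split_ifs with h1 h2
    · rw [ih (k + 1) out]
    · rw [ih (k - 1) out]
    · simp only [List.nil_append]
      rw [ih k (out ++ [c]), ih k [c]]; simp

-- A's step with a pending-pop count k: the guarded pop is just dropLast
theorem parseStep_hash (st : List Char) : parseStep st '#' = st.dropLast := by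
  unfold parseStep
  split_ifs with h1 h2
  · rfl
  · simp at h2; simp [h2]
  · simp at h1

-- main invariant: scanning the reversed list with skip k yields A's stack with its last k elements removed
theorem parseAltLoop_spec (m : List Char) : ∀ (k : Nat),
    (parseAltLoop m k []).reverse =
      (m.reverse.foldl parseStep []).take ((m.reverse.foldl parseStep []).length - k) := by
  induction m with
  | nil => intro k; simp [parseAltLoop]
  | cons c rest ih =>
    intro k
    have hsplit : (c :: rest).reverse.foldl parseStep [] =
        parseStep (rest.reverse.foldl parseStep []) c := by
      simp [List.foldl_append]
    set t := rest.reverse.foldl parseStep [] with ht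
    simp only [parseAltLoop]
    split_ifs with h1 h2
    · -- c = '#': skip increments; result stack is t.dropLast
      rw [hsplit, h1, parseStep_hash, ih (k + 1), List.dropLast_eq_take]
      rw [List.take_take, List.length_take]
      congr 1
      omega
    · -- c ≠ '#', skip > 0: char deleted, skip decrements; stack is t ++ [c]
      rw [hsplit, ih (k - 1)]
      unfold parseStep
      rw [if_neg h1]
      have hle : t.length + 1 - k ≤ t.length := by omega
      rw [List.take_append_of_le_length (by simpa using hle)]
      congr 1
      simp
      omega
    · -- c ≠ '#', skip = 0: char survives
      have hk : k = 0 := by omega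
      simp only [List.nil_append, hk]
      rw [parseAltLoop_out rest 0 [c], hsplit]
      unfold parseStep
      rw [if_neg h1]
      simp only [List.reverse_append, List.reverse_cons, List.reverse_nil]
      rw [ih 0]
      simp

-- ===== VERDICT (by name: the statement is the Claim_ definition above) =====
theorem parse_spec : Claim_equal_parse := by
  intro s _
  unfold Spec_parse parse parse_alt
  rw [parseAltLoop_spec s.toList.reverse 0]
  simp
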